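-- pv_equiv track=rewrite | github.com/FCP-INDI/C-PAC | CPAC/utils/bids_utils.py | combine_multiple_entity_instances
-- ===== SOURCE A (Python) =====
-- def camelCase(string: str) -> str:  # pylint: disable=invalid-name
--     """Convert a hyphenated string to camelCase
--
--     Parameters
--     ----------
--     string : str
--         string to convert to camelCase
--
--     Returns
--     -------
--     str
--
--     Examples
--     --------
--     >>> camelCase('PearsonNilearn-aCompCor')
--     'PearsonNilearnACompCor'
--     >>> camelCase('mean-Pearson-Nilearn-aCompCor')
--     'meanPearsonNilearnACompCor'
--     """
--     pieces = string.split('-')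
--     for i in range(1, len(pieces)):  # don't change case of first piece
--         if pieces[i]:  # don't do anything to falsy pieces
--             pieces[i] = f'{pieces[i][0].upper()}{pieces[i][1:]}'
--     return ''.join(pieces)
--
-- def combine_multiple_entity_instances(bids_str: str) -> str:
--     """Combines mutliple instances of a key in a BIDS string to a single
--     instance by camelCasing and concatenating the values
--
--     Parameters
--     ----------
--     bids_str : str
--
--     Returns
--     -------
--     str
--
--     Examples
--     --------
--     >>> combine_multiple_entity_instances(
--     ...     'sub-1_ses-HBN_site-RU_task-rest_atlas-AAL_'
--     ...     'desc-Nilearn_desc-36-param_suffix.ext')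
--     'sub-1_ses-HBN_site-RU_task-rest_atlas-AAL_desc-Nilearn36Param_suffix.ext'
--     >>> combine_multiple_entity_instances(
--     ...     'sub-1_ses-HBN_site-RU_task-rest_'
--     ...     'run-1_framewise-displacement-power.1D')
--     'sub-1_ses-HBN_site-RU_task-rest_run-1_framewiseDisplacementPower.1D'
--     """
--     _entity_list = bids_str.split('_')
--     entity_list = _entity_list[:-1]
--     suffixes = [camelCase(_entity_list[-1])]
--     entities = {}
--     for entity in entity_list:
--         if '-' in entity:
--             key, value = entity.split('-', maxsplit=1)
--             if key not in entities:
--                 entities[key] = []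
--             entities[key].append(value)
--     for key, value in entities.items():
--         entities[key] = camelCase('-'.join(value))
--     if 'desc' in entities:  # make 'desc' final entity
--         suffixes.insert(0, f'desc-{entities.pop("desc")}')
--     return '_'.join([f'{key}-{value}' for key, value in entities.items()
--                      ] + suffixes)
-- ===== SOURCE B (Python) =====
-- def combine_multiple_entity_instances(bids_str: str) -> str:
--     """Single-pass variant: accumulate the camelCased value per key while
--     scanning, instead of collecting value lists and camelCasing afterwards."""
--     parts = bids_str.split('_')
--     *ents, last = parts
--     acc = {}
--     for ent in ents:
--         if '-' not in ent:
--             continue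
--         key, value = ent.split('-', 1)
--         for piece in value.split('-'):
--             if key in acc:
--                 acc[key] += piece[:1].upper() + piece[1:]
--             else:
--                 acc[key] = piece
--     sp = last.split('-')
--     suffix = sp[0] + ''.join(p[:1].upper() + p[1:] for p in sp[1:])
--     desc = acc.pop('desc', None)
--     tail = ([f'desc-{desc}'] if desc is not None else []) + [suffix]
--     return '_'.join([f'{k}-{v}' for k, v in acc.items()] + tail)
-- ===== Notes on version B (the rewrite author's own statement) =====
-- stated objective: alternative
-- what changed: Instead of collecting a list of values per key and then join+camelCasing each list in a second pass over the dict, B maintains an ordered dict of running camelCased strings updated piece-by-piece in a single pass, and relocates the description entity with a pop-with-default instead of a membership test plus pop.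
import Mathlib
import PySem

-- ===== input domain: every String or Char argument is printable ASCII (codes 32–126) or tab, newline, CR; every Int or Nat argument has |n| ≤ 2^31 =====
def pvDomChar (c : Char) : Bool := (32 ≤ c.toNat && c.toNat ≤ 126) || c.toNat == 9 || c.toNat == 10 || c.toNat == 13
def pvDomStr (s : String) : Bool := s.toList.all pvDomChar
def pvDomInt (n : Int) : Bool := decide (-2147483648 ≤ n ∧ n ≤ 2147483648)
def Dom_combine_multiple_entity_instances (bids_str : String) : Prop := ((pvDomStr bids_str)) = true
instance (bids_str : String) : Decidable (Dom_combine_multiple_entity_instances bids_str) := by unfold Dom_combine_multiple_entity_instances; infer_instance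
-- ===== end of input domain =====

-- B combines the A's collect-then-transform dict loop into a single accumulate-in-place pass
-- of running camelCased strings (objective: alternative decomposition; return value only, the
-- Python originals mutate nothing observable).

-- ===== PORT A =====

-- `f'{p[0].upper()}{p[1:]}'` applied to a piece when it is truthy (camelCase's loop body)
def pvCapA (p : List Char) : List Char :=
  match p with
  | [] => p
  | c :: cs => PySem.Chars.upperChar c :: cs

-- camelCase: split on '-', upper-case the first letter of every nonempty piece but the first, join
def pvCamelA (s : List Char) : List Char :=
  match PySem.Chars.splitOn s ['-'] with
  | [] => []  -- unreachable: split never returns an empty list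
  | p :: rest => PySem.Chars.join [] (p :: rest.map pvCapA)

-- body of A's first `for entity in entity_list` loop
def pvStepA (d : PySem.Dict (List Char) (List (List Char))) (ent : List Char) :
    PySem.Dict (List Char) (List (List Char)) :=
  if PySem.Chars.isIn ['-'] ent then
    match PySem.Chars.splitOnMax ent ['-'] 1 with
    | [key, value] =>
        (if d.contains key then d else d.insert key []).modify key [] (· ++ [value])
    | _ => d  -- unreachable: a string containing '-' splits (maxsplit=1) into exactly two pieces
  else d

def combine_multiple_entity_instances (bids_str : String) : String :=
  let _entity_list := PySem.Chars.splitOn bids_str.toList ['_']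
  let entity_list := PySem.List.slice _entity_list none (some (-1))
  -- `_entity_list[-1]` never raises: split always returns a nonempty list
  let suffixes := [pvCamelA ((PySem.List.pyGet? _entity_list (-1)).getD [])]
  let entities := entity_list.foldl pvStepA PySem.Dict.empty
  -- `for key, value in entities.items(): entities[key] = camelCase('-'.join(value))`
  let entities : PySem.Dict (List Char) (List Char) :=
    PySem.Dict.mk (entities.items.map (fun p => (p.1, pvCamelA (PySem.Chars.join ['-'] p.2))))
  if entities.contains "desc".toList then
    let v := (entities.get? "desc".toList).getD []   -- entities.pop("desc")
    let entities := entities.erase "desc".toList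
    String.ofList (PySem.Chars.join ['_']
      (entities.items.map (fun p => p.1 ++ '-' :: p.2) ++ (("desc-".toList ++ v) :: suffixes)))
  else
    String.ofList (PySem.Chars.join ['_']
      (entities.items.map (fun p => p.1 ++ '-' :: p.2) ++ suffixes))

-- ===== PORT B =====

-- `piece[:1].upper() + piece[1:]`
def pvCapB (p : List Char) : List Char :=
  PySem.Chars.upper (PySem.List.slice p none (some 1)) ++ PySem.List.slice p (some 1) none

-- body of B's single accumulation pass
def pvStepB (d : PySem.Dict (List Char) (List Char)) (ent : List Char) :
    PySem.Dict (List Char) (List Char) :=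
  if PySem.Chars.isIn ['-'] ent then
    match PySem.Chars.splitOnMax ent ['-'] 1 with
    | [key, value] =>
        (PySem.Chars.splitOn value ['-']).foldl
          (fun d piece =>
            if d.contains key then d.modify key [] (· ++ pvCapB piece)
            else d.insert key piece) d
    | _ => d  -- unreachable, as in A
  else d

def combine_multiple_entity_instances_alt (bids_str : String) : String :=
  let parts := PySem.Chars.splitOn bids_str.toList ['_']
  -- `*ents, last = parts` never raises: split always returns a nonempty list
  let last := parts.getLastD []
  let acc := (PySem.List.slice parts none (some (-1))).foldl pvStepB PySem.Dict.empty
  let suffix :=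
    match PySem.Chars.splitOn last ['-'] with
    | [] => []  -- unreachable
    | p :: rest => p ++ PySem.Chars.join [] (rest.map pvCapB)
  match acc.pop? "desc".toList with
  | some (v, acc') =>
      String.ofList (PySem.Chars.join ['_']
        (acc'.items.map (fun p => p.1 ++ '-' :: p.2) ++ [("desc-".toList ++ v), suffix]))
  | none =>
      String.ofList (PySem.Chars.join ['_']
        (acc.items.map (fun p => p.1 ++ '-' :: p.2) ++ [suffix]))

-- ===== PRECONDITION & SPEC =====
def Spec_combine_multiple_entity_instances (bids_str : String) (out : String) : Prop := out = combine_multiple_entity_instances_alt bids_str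
instance (bids_str : String) (out : String) : Decidable (Spec_combine_multiple_entity_instances bids_str out) := by unfold Spec_combine_multiple_entity_instances; infer_instance

-- ===== CLAIM (what is proved, stated in full; the proofs are below) =====
def Claim_equal_combine_multiple_entity_instances : Prop := ∀ (bids_str : String), Dom_combine_multiple_entity_instances bids_str → Spec_combine_multiple_entity_instances bids_str (combine_multiple_entity_instances bids_str)

-- ===== LEMMAS AND PROOFS =====

-- bridge: Python split on a single-char separator is List.splitOn
theorem pv_go_spec (c : Char) : ∀ (fuel : Nat) (l cur : List Char) (acc : List (List Char)),
    l.length ≤ fuel →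
    PySem.Chars.splitOn.go [c] fuel l cur acc
      = acc.reverse ++ (List.splitOn c l).modifyHead (cur.reverse ++ ·) := by
  intro fuel
  induction fuel with
  | zero =>
    intro l cur acc h
    have : l = [] := List.eq_nil_of_length_eq_zero (Nat.le_zero.mp h)
    subst this
    simp [PySem.Chars.splitOn.go, List.splitOn]
  | succ f ih =>
    intro l cur acc h
    cases l with
    | nil => simp [PySem.Chars.splitOn.go, List.splitOn]
    | cons x rest =>
      simp only [PySem.Chars.splitOn.go]
      by_cases hx : x = c
      · subst hx
        have hp : [x].isPrefixOf (x :: rest) = true := by simp [List.isPrefixOf]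
        rw [if_pos hp]
        rw [ih _ _ _ (by simpa using Nat.le_of_succ_le_succ h)]
        simp [List.splitOn, List.splitOnP_cons]
        exact congrFun List.modifyHead_id _
      · have hp : [c].isPrefixOf (x :: rest) = false := by
          simp [List.isPrefixOf]; exact fun hxc => absurd hxc.symm hx
        rw [if_neg (by simp [hp])]
        rw [ih _ _ _ (by simpa using Nat.le_of_succ_le_succ h)]
        simp only [List.splitOn, List.splitOnP_cons, beq_iff_eq]
        rw [if_neg hx]
        rcases hsp : List.splitOnP (fun x => x == c) rest with _ | ⟨p, ps⟩
        · exact absurd hsp (List.splitOnP_ne_nil _ _)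
        · simp

theorem pv_splitOn_singleton (s : List Char) (c : Char) :
    PySem.Chars.splitOn s [c] = List.splitOn c s := by
  rw [PySem.Chars.splitOn, pv_go_spec c _ _ _ _ (Nat.le_succ _)]
  rcases h : List.splitOn c s with _ | ⟨p, ps⟩
  · exact absurd h (List.splitOnP_ne_nil _ _)
  · simp

theorem pv_splitOn_ne_nil (s : List Char) (c : Char) :
    PySem.Chars.splitOn s [c] ≠ [] := by
  rw [pv_splitOn_singleton]; exact List.splitOnP_ne_nil _ _

-- ''.join is flatten
theorem pv_join_empty : ∀ (parts : List (List Char)),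
    PySem.Chars.join [] parts = parts.flatten
  | [] => by simp [PySem.Chars.join_nil]
  | [p] => by simp [PySem.Chars.join_singleton]
  | p :: q :: rest => by
      rw [PySem.Chars.join_cons_cons, pv_join_empty (q :: rest)]
      simp

-- '-'.join(vs + [v]) for nonempty vs
theorem pv_join_append_singleton (c : Char) : ∀ (vs : List (List Char)) (v : List Char),
    vs ≠ [] → PySem.Chars.join [c] (vs ++ [v]) = PySem.Chars.join [c] vs ++ c :: v
  | [], _, h => absurd rfl h
  | [a], v, _ => by
      simp [PySem.Chars.join_cons_cons, PySem.Chars.join_singleton]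
  | a :: b :: rest, v, _ => by
      have := pv_join_append_singleton c (b :: rest) v (by simp)
      simp only [List.cons_append, PySem.Chars.join_cons_cons] at *
      rw [this]; simp

-- the two piece-capitalisation helpers agree
theorem pv_cap_eq (p : List Char) : pvCapB p = pvCapA p := by
  cases p with
  | nil => rfl
  | cons c cs =>
    simp [pvCapB, pvCapA, pysem, PySem.Chars.upper]

-- camelCase pieces, on the List.splitOn side
def pvCapFlat (v : List Char) : List Char := ((List.splitOn '-' v).map pvCapA).flatten

theorem pv_camel_append (a b : List Char) :
    pvCamelA (a ++ '-' :: b) = pvCamelA a ++ pvCapFlat b := by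
  unfold pvCamelA pvCapFlat
  rw [pv_splitOn_singleton, pv_splitOn_singleton,
    show List.splitOn '-' (a ++ '-' :: b) = List.splitOn '-' a ++ List.splitOn '-' b from
      List.splitOnP_append_cons _ _ _ _ (by simp)]
  rcases ha : List.splitOn '-' a with _ | ⟨p, ps⟩
  · exact absurd ha (List.splitOnP_ne_nil _ _)
  rcases hb : List.splitOn '-' b with _ | ⟨q, qs⟩
  · exact absurd hb (List.splitOnP_ne_nil _ _)
  simp [pv_join_empty]

def pvCamelJoin (vs : List (List Char)) : List Char := pvCamelA (PySem.Chars.join ['-'] vs)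

theorem pv_camelJoin_singleton (v : List Char) : pvCamelJoin [v] = pvCamelA v := by
  simp [pvCamelJoin, PySem.Chars.join_singleton]

theorem pv_camelJoin_append (vs : List (List Char)) (v : List Char) (h : vs ≠ []) :
    pvCamelJoin (vs ++ [v]) = pvCamelJoin vs ++ pvCapFlat v := by
  unfold pvCamelJoin
  rw [pv_join_append_singleton _ _ _ h, pv_camel_append]

theorem pv_camelA_pieces (v : List Char) (p : List Char) (ps : List (List Char))
    (h : List.splitOn '-' v = p :: ps) :
    pvCamelA v = p ++ (ps.map pvCapA).flatten := by
  unfold pvCamelA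
  rw [pv_splitOn_singleton, h]
  simp [pv_join_empty]

-- value-mapped dictionary (B's dict in terms of A's)
def pvMapVal (d : PySem.Dict (List Char) (List (List Char))) : PySem.Dict (List Char) (List Char) :=
  PySem.Dict.mk (d.items.map (fun p => (p.1, pvCamelJoin p.2)))

theorem pv_mapVal_contains (d : PySem.Dict (List Char) (List (List Char))) (k : List Char) :
    (pvMapVal d).contains k = d.contains k := by
  simp [pvMapVal, PySem.Dict.contains, List.any_map, Function.comp_def]

theorem pv_mapVal_get? (d : PySem.Dict (List Char) (List (List Char))) (k : List Char) :
    (pvMapVal d).get? k = (d.get? k).map pvCamelJoin := by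
  simp only [pvMapVal, PySem.Dict.get?, List.find?_map]
  rcases h : d.items.find? (fun p => p.1 == k) with _ | p <;>
    simp_all [Function.comp_def]

theorem pv_mapVal_insert (d : PySem.Dict (List Char) (List (List Char))) (k : List Char)
    (v : List (List Char)) :
    pvMapVal (d.insert k v) = (pvMapVal d).insert k (pvCamelJoin v) := by
  by_cases hc : d.contains k = true
  · rw [PySem.Dict.insert, if_pos hc, PySem.Dict.insert, if_pos (by rw [pv_mapVal_contains]; exact hc)]
    simp only [pvMapVal, PySem.Dict.mk.injEq, List.map_map]
    apply List.map_congr_left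
    intro p _
    by_cases hp : p.1 = k <;> simp [hp]
  · rw [PySem.Dict.insert, if_neg hc, PySem.Dict.insert, if_neg (by rw [pv_mapVal_contains]; exact hc)]
    simp [pvMapVal]

-- B's inner fold over the remaining pieces of a value, once the key is present
theorem pv_foldB (key : List Char) :
    ∀ (ps : List (List Char)) (d : PySem.Dict (List Char) (List Char)) (s : List Char),
    ps.foldl
      (fun d piece =>
        if d.contains key then d.modify key [] (· ++ pvCapB piece)
        else d.insert key piece) (d.insert key s)
      = d.insert key (s ++ (ps.map pvCapB).flatten)
  | [], d, s => by simp
  | p :: ps, d, s => by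
      rw [List.foldl_cons, if_pos (PySem.Dict.contains_insert_self _ _ _),
        PySem.Dict.modify, PySem.Dict.getD_insert_self, PySem.Dict.insert_insert_self,
        pv_foldB key ps d (s ++ pvCapB p)]
      simp

-- the loop invariant: B's dict is A's with every value list camelJoined; A's value lists are nonempty
def pvInv (dA : PySem.Dict (List Char) (List (List Char))) (dB : PySem.Dict (List Char) (List Char)) :
    Prop :=
  dB = pvMapVal dA ∧ ∀ p ∈ dA.items, p.2 ≠ []

theorem pv_step (dA : PySem.Dict (List Char) (List (List Char)))
    (dB : PySem.Dict (List Char) (List Char)) (ent : List Char) (h : pvInv dA dB) :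
    pvInv (pvStepA dA ent) (pvStepB dB ent) := by
  obtain ⟨hm, hne⟩ := h
  unfold pvStepA pvStepB
  by_cases hd : PySem.Chars.isIn ['-'] ent = true
  · rw [if_pos hd, if_pos hd]
    rcases hsp : PySem.Chars.splitOnMax ent ['-'] 1 with _ | ⟨key, _ | ⟨value, _ | _⟩⟩
    · exact ⟨hm, hne⟩
    · exact ⟨hm, hne⟩
    · -- the real case: ent split into key and value
      show pvInv
        ((if dA.contains key = true then dA else dA.insert key []).modify key [] (· ++ [value]))
        (List.foldl
          (fun d piece =>
            if d.contains key = true then d.modify key [] (· ++ pvCapB piece)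
            else d.insert key piece)
          dB (PySem.Chars.splitOn value ['-']))
      rcases hv : PySem.Chars.splitOn value ['-'] with _ | ⟨p0, ps⟩
      · exact absurd hv (pv_splitOn_ne_nil _ _)
      have hv' : List.splitOn '-' value = p0 :: ps := by rw [← pv_splitOn_singleton]; exact hv
      by_cases hc : dA.contains key = true
      · -- key already collected
        rw [if_pos hc]
        have hcB : dB.contains key = true := by rw [hm, pv_mapVal_contains]; exact hc
        obtain ⟨vs, hvs⟩ : ∃ vs, dA.get? key = some vs := by
          rcases hg : dA.get? key with _ | vs
          · rw [PySem.Dict.contains_eq_isSome_get?, hg] at hc; simp at hc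
          · exact ⟨vs, rfl⟩
        have hvsne : vs ≠ [] := hne _ (PySem.Dict.mem_items_of_get?_eq_some _ hvs)
        have hgB : dB.getD key [] = pvCamelJoin vs := by
          rw [hm, PySem.Dict.getD_eq_get?_getD, pv_mapVal_get?, hvs]; rfl
        rw [List.foldl_cons, if_pos hcB,
          show (dB.modify key [] (· ++ pvCapB p0)) = dB.insert key (pvCamelJoin vs ++ pvCapB p0) from by
            rw [PySem.Dict.modify, hgB], pv_foldB]
        constructor
        · rw [PySem.Dict.modify, pv_mapVal_insert, PySem.Dict.getD_eq_get?_getD, hvs]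
          have : pvCamelJoin (vs ++ [value]) = pvCamelJoin vs ++ pvCapB p0 ++ (ps.map pvCapB).flatten := by
            rw [pv_camelJoin_append _ _ hvsne]
            simp only [pvCapFlat, hv', List.map_cons, List.flatten_cons, pv_cap_eq, List.append_assoc]
            congr 2
            exact congrArg List.flatten (List.map_congr_left (fun x _ => (pv_cap_eq x).symm))
          rw [Option.getD_some, this, hm]
        · intro p hp
          rw [PySem.Dict.modify] at hp
          rcases (PySem.Dict.mem_items_insert _ _ _ _).mp hp with h1 | ⟨h2, _⟩
          · subst h1; simp
          · exact hne _ h2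
      · -- fresh key
        rw [if_neg hc]
        have hcB : dB.contains key = false := by
          rw [hm, pv_mapVal_contains]; exact Bool.not_eq_true _ ▸ (by simpa using hc)
        rw [List.foldl_cons, if_neg (by rw [hcB]; simp), pv_foldB]
        constructor
        · rw [PySem.Dict.modify, PySem.Dict.getD_insert_self, PySem.Dict.insert_insert_self,
            pv_mapVal_insert]
          congr 1
          rw [List.nil_append, pv_camelJoin_singleton, pv_camelA_pieces value p0 ps hv']
          congr 1
          exact congrArg List.flatten (List.map_congr_left (fun x _ => pv_cap_eq x))
        · intro p hp
          rw [PySem.Dict.modify, PySem.Dict.getD_insert_self, PySem.Dict.insert_insert_self] at hp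
          rcases (PySem.Dict.mem_items_insert _ _ _ _).mp hp with h1 | ⟨h2, _⟩
          · subst h1; simp
          · exact hne _ h2
    · exact ⟨hm, hne⟩
  · rw [if_neg hd, if_neg hd]; exact ⟨hm, hne⟩

theorem pv_inv_fold : ∀ (ents : List (List Char)) (dA : PySem.Dict (List Char) (List (List Char)))
    (dB : PySem.Dict (List Char) (List Char)), pvInv dA dB →
    pvInv (ents.foldl pvStepA dA) (ents.foldl pvStepB dB)
  | [], _, _, h => h
  | e :: es, _, _, h => pv_inv_fold es _ _ (pv_step _ _ e h)

theorem pv_inv_empty : pvInv PySem.Dict.empty PySem.Dict.empty :=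
  ⟨rfl, by simp [PySem.Dict.empty]⟩

-- B's suffix computation is camelCase
theorem pv_suffix_eq (s : List Char) :
    (match PySem.Chars.splitOn s ['-'] with
      | [] => ([] : List Char)
      | p :: rest => p ++ PySem.Chars.join [] (rest.map pvCapB)) = pvCamelA s := by
  rcases h : PySem.Chars.splitOn s ['-'] with _ | ⟨p, rest⟩
  · exact absurd h (pv_splitOn_ne_nil _ _)
  · unfold pvCamelA
    rw [h]
    simp only [pv_join_empty, List.flatten_cons]
    congr 1
    exact congrArg List.flatten (List.map_congr_left (fun x _ => pv_cap_eq x))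

-- ===== VERDICT (by name: the statement is the Claim_ definition above) =====
theorem combine_multiple_entity_instances_spec : Claim_equal_combine_multiple_entity_instances := by
  intro bids _
  unfold Spec_combine_multiple_entity_instances
  simp only [combine_multiple_entity_instances, combine_multiple_entity_instances_alt]
  have hlast : (PySem.List.pyGet? (PySem.Chars.splitOn bids.toList ['_']) (-1)).getD []
      = (PySem.Chars.splitOn bids.toList ['_']).getLastD [] := by simp [pysem]
  rw [hlast]
  obtain ⟨hm, -⟩ := pv_inv_fold
    (PySem.List.slice (PySem.Chars.splitOn bids.toList ['_']) none (some (-1)))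
    _ _ pv_inv_empty
  have hdicts :
      PySem.Dict.mk
        ((((PySem.List.slice (PySem.Chars.splitOn bids.toList ['_']) none (some (-1))).foldl
            pvStepA PySem.Dict.empty)).items.map
          (fun p => (p.1, pvCamelA (PySem.Chars.join ['-'] p.2))))
      = (PySem.List.slice (PySem.Chars.splitOn bids.toList ['_']) none (some (-1))).foldl
          pvStepB PySem.Dict.empty := by
    rw [hm]; rfl
  have hitems : List.map (fun p => (p.1, pvCamelA (PySem.Chars.join ['-'] p.2)))
      ((PySem.List.slice (PySem.Chars.splitOn bids.toList ['_']) none (some (-1))).foldl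
        pvStepA PySem.Dict.empty).items
      = ((PySem.List.slice (PySem.Chars.splitOn bids.toList ['_']) none (some (-1))).foldl
        pvStepB PySem.Dict.empty).items := by
    rw [hm]; rfl
  rw [hdicts, pv_suffix_eq, hitems]
  rcases hg : ((PySem.List.slice (PySem.Chars.splitOn bids.toList ['_']) none (some (-1))).foldl
      pvStepB PySem.Dict.empty).get? "desc".toList with _ | v
  · rw [if_neg (by rw [PySem.Dict.contains_eq_isSome_get?, hg]; simp),
      show ((PySem.List.slice (PySem.Chars.splitOn bids.toList ['_']) none (some (-1))).foldl
        pvStepB PySem.Dict.empty).pop? "desc".toList = none from by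
          rw [PySem.Dict.pop?, hg]; rfl]
  · rw [if_pos (by rw [PySem.Dict.contains_eq_isSome_get?, hg]; rfl),
      show ((PySem.List.slice (PySem.Chars.splitOn bids.toList ['_']) none (some (-1))).foldl
        pvStepB PySem.Dict.empty).pop? "desc".toList
        = some (v, ((PySem.List.slice (PySem.Chars.splitOn bids.toList ['_']) none (some (-1))).foldl
            pvStepB PySem.Dict.empty).erase "desc".toList) from by
          rw [PySem.Dict.pop?, hg]; rfl,
      Option.getD_some]
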